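-- pv_equiv track=rewrite | github.com/onojk/geom_factor | prime_bucket_decay_graph.py | sieve_is_prime
-- ===== SOURCE A (Python) =====
-- import math
-- from typing import List, Tuple
--
-- def sieve_is_prime(n: int) -> List[bool]:
--     """Simple sieve up to n inclusive."""
--     if n < 1:
--         return [False] * (n + 1)
--     is_p = [True] * (n + 1)
--     is_p[0] = False
--     if n >= 1:
--         is_p[1] = False
--     r = int(math.isqrt(n))
--     for p in range(2, r + 1):
--         if is_p[p]:
--             step = p
--             start = p * p
--             is_p[start : n + 1 : step] = [False] * (((n - start) // step) + 1)
--     return is_p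
-- ===== SOURCE B (Python) =====
-- import math
--
-- def sieve_is_prime(n: int):
--     """Per-number trial division instead of a crossing sieve."""
--     if n < 1:
--         return [False] * (n + 1)
--     return [i >= 2 and all(i % d != 0 for d in range(2, math.isqrt(i) + 1))
--             for i in range(n + 1)]
-- ===== Notes on version B (the rewrite author's own statement) =====
-- stated objective: simpler
-- what changed: Replaces the multiple-crossing sieve with strided slice assignment by a single comprehension that classifies each i independently via trial division up to isqrt(i).
import Mathlib
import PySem

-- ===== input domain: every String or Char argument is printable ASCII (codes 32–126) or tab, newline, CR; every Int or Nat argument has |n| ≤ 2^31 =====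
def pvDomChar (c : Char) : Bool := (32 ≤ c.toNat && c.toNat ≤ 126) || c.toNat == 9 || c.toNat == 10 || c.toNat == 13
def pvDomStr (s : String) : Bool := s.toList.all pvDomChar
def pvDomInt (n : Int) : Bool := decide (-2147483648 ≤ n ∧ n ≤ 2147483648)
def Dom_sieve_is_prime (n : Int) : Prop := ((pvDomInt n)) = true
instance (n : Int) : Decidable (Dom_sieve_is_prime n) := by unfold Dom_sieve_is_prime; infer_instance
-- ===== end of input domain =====

-- B replaces the multiple-crossing sieve by a single comprehension classifying each i
-- independently via trial division up to isqrt(i) (objective: simpler; not faster).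

-- ===== PORT A =====
-- Exact semantics of Python's strided slice assignment
-- `L[start : len L : step] = [False] * (((len L - 1 - start) // step) + 1)`
-- (in A, start = p*p ≤ n and step = p ≥ 2, so the replacement length matches exactly):
-- it sets to False every index i with start ≤ i < len L and (i - start) % step = 0.
def pvCrossOut (start step : Nat) (L : List Bool) : List Bool :=
  L.mapIdx (fun i b => if start ≤ i ∧ (i - start) % step = 0 then false else b)

def sieve_is_prime (n : Int) : List Bool :=
  if n < 1 then List.replicate (n + 1).toNat false
  else
    let N := n.toNat
    let is_p := (List.replicate (N + 1) true).set 0 false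
    let is_p := if 1 ≤ n then is_p.set 1 false else is_p
    let r := Nat.sqrt N   -- math.isqrt, exact on nonnegative ints
    (List.range' 2 (r + 1 - 2)).foldl
      (fun L p => if L.getD p false = true then pvCrossOut (p * p) p L else L) is_p

-- ===== PORT B =====
def sieve_is_prime_alt (n : Int) : List Bool :=
  if n < 1 then List.replicate (n + 1).toNat false
  else
    (List.range (n.toNat + 1)).map (fun i =>
      decide (2 ≤ i) && (List.range' 2 (Nat.sqrt i + 1 - 2)).all (fun d => decide (i % d ≠ 0)))

-- ===== PRECONDITION & SPEC =====
def Spec_sieve_is_prime (n : Int) (out : List Bool) : Prop := out = sieve_is_prime_alt n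
instance (n : Int) (out : List Bool) : Decidable (Spec_sieve_is_prime n out) := by unfold Spec_sieve_is_prime; infer_instance

-- ===== CLAIM (what is proved, stated in full; the proofs are below) =====
def Claim_equal_sieve_is_prime : Prop := ∀ (n : Int), Dom_sieve_is_prime n → Spec_sieve_is_prime n (sieve_is_prime n)

-- ===== LEMMAS AND PROOFS =====

-- state of cell i after the sieve has processed all p with 2 ≤ p < k
def pvF (k i : Nat) : Bool :=
  decide (2 ≤ i ∧ ∀ q, q < k → ¬ (Nat.Prime q ∧ q ∣ i ∧ q * q ≤ i))

def pvSieveSpec (N k : Nat) : List Bool := (List.range (N + 1)).map (pvF k)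

-- initial array [F, F, T, T, ...] is the state for k = 2
lemma pv_init (N : Nat) :
    ((List.replicate (N + 1) true).set 0 false).set 1 false = pvSieveSpec N 2 := by
  apply List.ext_getElem
  · simp [pvSieveSpec]
  · intro i h1 h2
    simp only [pvSieveSpec, List.getElem_map, List.getElem_range, List.getElem_set,
      List.getElem_replicate, pvF]
    have hq : ∀ q, q < 2 → ¬ (Nat.Prime q ∧ q ∣ i ∧ q * q ≤ i) := by
      intro q hq hc
      have := hc.1.two_le
      omega
    by_cases hi : 2 ≤ i
    · simp only [if_neg (by omega : ¬ 1 = i), if_neg (by omega : ¬ 0 = i)]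
      symm
      rw [decide_eq_true_iff]
      exact ⟨hi, hq⟩
    · interval_cases i <;> simp

-- the guard: at time p the cell p reads exactly "p is prime"
lemma pv_guard (p : Nat) (hp : 2 ≤ p) : pvF p p = decide (Nat.Prime p) := by
  have : (2 ≤ p ∧ ∀ q, q < p → ¬ (Nat.Prime q ∧ q ∣ p ∧ q * q ≤ p)) ↔ Nat.Prime p := by
    constructor
    · rintro ⟨-, h⟩
      by_contra hnp
      have hq1 : p.minFac.Prime := Nat.minFac_prime (by omega)
      have hq2 : p.minFac ∣ p := Nat.minFac_dvd p
      have hq3 : p.minFac * p.minFac ≤ p := by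
        have := Nat.minFac_sq_le_self (by omega : 0 < p) hnp
        nlinarith
      have h2q : 2 ≤ p.minFac := hq1.two_le
      have : p.minFac < p := by nlinarith
      exact h p.minFac this ⟨hq1, hq2, hq3⟩
    · intro hpr
      refine ⟨hp, fun q hq hc => ?_⟩
      rcases hpr.eq_one_or_self_of_dvd q hc.2.1 with h1 | h1
      · exact absurd h1 hc.1.one_lt.ne'
      · omega
  unfold pvF
  exact decide_eq_decide.mpr this

-- crossing out multiples of a prime p advances the state from k = p to k = p + 1
lemma pv_cross (N p : Nat) (hp : Nat.Prime p) :
    pvCrossOut (p * p) p (pvSieveSpec N p) = pvSieveSpec N (p + 1) := by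
  apply List.ext_getElem
  · simp [pvCrossOut, pvSieveSpec]
  · intro i h1 h2
    simp only [pvCrossOut, List.getElem_mapIdx, pvSieveSpec, List.getElem_map,
      List.getElem_range, pvF]
    have hdvd : p * p ≤ i → ((i - p * p) % p = 0 ↔ p ∣ i) := by
      intro hle
      rw [← Nat.dvd_iff_mod_eq_zero]
      constructor
      · intro h
        have := Nat.dvd_add h (Dvd.intro p rfl)
        rwa [Nat.sub_add_cancel hle] at this
      · intro h
        exact Nat.dvd_sub h (Dvd.intro p rfl)
    by_cases hc : p * p ≤ i ∧ (i - p * p) % p = 0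
    · rw [if_pos hc]
      have hpi : p ∣ i := (hdvd hc.1).mp hc.2
      symm
      rw [decide_eq_false_iff_not]
      rintro ⟨-, h⟩
      exact h p (by omega) ⟨hp, hpi, hc.1⟩
    · rw [if_neg hc]
      apply decide_eq_decide.mpr
      constructor
      · rintro ⟨h2i, h⟩
        refine ⟨h2i, fun q hq hx => ?_⟩
        by_cases hqp : q = p
        · subst hqp
          exact hc ⟨hx.2.2, (hdvd hx.2.2).mpr hx.2.1⟩
        · exact h q (by omega) hx
      · rintro ⟨h2i, h⟩
        exact ⟨h2i, fun q hq hx => h q (by omega) hx⟩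
    
-- skipping a composite p does not change the state
lemma pv_skip (N p : Nat) (hp : ¬ Nat.Prime p) : pvSieveSpec N p = pvSieveSpec N (p + 1) := by
  unfold pvSieveSpec
  apply List.map_congr_left
  intro i _
  unfold pvF
  apply decide_eq_decide.mpr
  constructor
  · rintro ⟨h2i, h⟩
    refine ⟨h2i, fun q hq hx => ?_⟩
    by_cases hqp : q = p
    · exact hp (hqp ▸ hx.1)
    · exact h q (by omega) hx
  · rintro ⟨h2i, h⟩
    exact ⟨h2i, fun q hq hx => h q (by omega) hx⟩

-- the main loop invariant
lemma pv_loop (N : Nat) (len k : Nat) (hk : 2 ≤ k) (hb : k + len ≤ Nat.sqrt N + 1) :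
    (List.range' k len).foldl
      (fun L p => if L.getD p false = true then pvCrossOut (p * p) p L else L)
      (pvSieveSpec N k) = pvSieveSpec N (k + len) := by
  induction len generalizing k with
  | zero => simp
  | succ m ih =>
    rw [List.range'_succ, List.foldl_cons]
    have hkN : k < N + 1 := by
      have h1 : k ≤ Nat.sqrt N := by omega
      have h2 : Nat.sqrt N ≤ N := Nat.sqrt_le_self N
      omega
    have hget : (pvSieveSpec N k).getD k false = pvF k k := by
      rw [List.getD_eq_getElem _ _ (by simp [pvSieveSpec]; omega)]
      simp [pvSieveSpec]
    have step : (if (pvSieveSpec N k).getD k false = true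
        then pvCrossOut (k * k) k (pvSieveSpec N k) else pvSieveSpec N k)
        = pvSieveSpec N (k + 1) := by
      rw [hget, pv_guard k hk]
      by_cases hp : Nat.Prime k
      · simp only [hp, decide_true]
        exact pv_cross N k hp
      · simp only [hp, decide_false]
        rw [if_neg (by simp)]
        exact pv_skip N k hp
    rw [step, ih (k + 1) (by omega) (by omega)]
    congr 1
    omega

-- after the whole loop every cell reads ordinary primality
lemma pv_final (N i : Nat) (hi : i ≤ N) :
    pvF (Nat.sqrt N + 1) i = decide (Nat.Prime i) := by
  unfold pvF
  apply decide_eq_decide.mpr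
  constructor
  · rintro ⟨h2i, h⟩
    by_contra hnp
    have hq1 : i.minFac.Prime := Nat.minFac_prime (by omega)
    have hq2 : i.minFac ∣ i := Nat.minFac_dvd i
    have hq3 : i.minFac * i.minFac ≤ i := by
      have := Nat.minFac_sq_le_self (by omega : 0 < i) hnp
      nlinarith
    have hle : i.minFac ≤ Nat.sqrt N := Nat.le_sqrt.mpr (le_trans hq3 hi)
    exact h i.minFac (by omega) ⟨hq1, hq2, hq3⟩
  · intro hpr
    refine ⟨hpr.two_le, fun q hq hx => ?_⟩
    rcases hpr.eq_one_or_self_of_dvd q hx.2.1 with h1 | h1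
    · exact absurd h1 hx.1.one_lt.ne'
    · subst h1
      have := hpr.two_le
      nlinarith [hx.2.2]

-- B's trial division also reads ordinary primality
lemma pv_alt_cell (i : Nat) :
    (decide (2 ≤ i) && (List.range' 2 (Nat.sqrt i + 1 - 2)).all (fun d => decide (i % d ≠ 0)))
      = decide (Nat.Prime i) := by
  rw [Bool.eq_iff_iff]
  simp only [Bool.and_eq_true, decide_eq_true_eq, List.all_eq_true, List.mem_range'_1]
  rw [Nat.prime_def_le_sqrt]
  constructor
  · rintro ⟨h2i, h⟩
    refine ⟨h2i, fun m h2m hms => ?_⟩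
    rw [Nat.dvd_iff_mod_eq_zero]
    exact h m ⟨h2m, by omega⟩
  · rintro ⟨h2i, h⟩
    refine ⟨h2i, fun d hd => ?_⟩
    intro hmod
    exact h d hd.1 (by omega) (Nat.dvd_of_mod_eq_zero hmod)

-- ===== VERDICT (by name: the statement is the Claim_ definition above) =====
theorem sieve_is_prime_spec : Claim_equal_sieve_is_prime := by
  intro n _
  unfold Spec_sieve_is_prime sieve_is_prime sieve_is_prime_alt
  by_cases h : n < 1
  · rw [if_pos h, if_pos h]
  · rw [if_neg h, if_neg h]
    dsimp only
    have h1 : 1 ≤ n := by omega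
    rw [if_pos h1]
    have hN : 1 ≤ n.toNat := by omega
    rw [pv_init n.toNat]
    have hsq : 1 ≤ Nat.sqrt n.toNat := Nat.sqrt_pos.mpr (by omega)
    have := pv_loop n.toNat (Nat.sqrt n.toNat + 1 - 2) 2 (by omega) (by omega)
    rw [this]
    have hk : 2 + (Nat.sqrt n.toNat + 1 - 2) = Nat.sqrt n.toNat + 1 := by omega
    rw [hk]
    unfold pvSieveSpec
    apply List.map_congr_left
    intro i hi
    rw [List.mem_range] at hi
    rw [pv_final n.toNat i (by omega), pv_alt_cell i]
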